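-- pv_equiv track=rewrite | github.com/yllkryeziu/adaptive-compute-rewrite | skythought/skythought_evals/tasks/base.py | make_conversation_from_contents
-- ===== SOURCE A (Python) =====
-- from typing import Any, Dict, List, Optional
--
-- ConversationType = List[Dict[str, Any]]
--
-- def make_conversation_from_contents(
--     contents: List[str],
--     system_prompt: Optional[str] = None,
--     user_template: Optional[str] = None,
--     assistant_prefill: Optional[str] = None,
-- ) -> ConversationType:
--     """Makes a conversation given a list of user/assistant message strings.
--
--     If system_prompt is provided, it will be added as the first message.
--     If user_template is provided, it will be used to format the user messages. This is useful for model-specific formatting.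
--
--     Args:
--         content: A list of user/assistant message strings.
--         system_prompt: An optional string for the system prompt.
--         user_template: An optional string for the user template.
--
--     Returns:
--         A list of dictionaries representing the conversation.
--     """
--
--     conversation = []
--     if system_prompt:
--         conversation.append({"role": "system", "content": system_prompt})
--
--     for i, content in enumerate(contents):
--         if i % 2 == 0:
--             content = user_template.format(content) if user_template else content
--             conversation.append({"role": "user", "content": content})
--         else:
--             conversation.append({"role": "assistant", "content": content})
--
--     if assistant_prefill and conversation[-1]["role"] == "user":
--         conversation.append({"role": "assistant", "content": assistant_prefill})
--
--     return conversation
-- ===== SOURCE B (Python) =====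
-- from typing import List, Optional
--
--
-- def make_conversation_from_contents(
--     contents: List[str],
--     system_prompt: Optional[str] = None,
--     user_template: Optional[str] = None,
--     assistant_prefill: Optional[str] = None,
-- ):
--     """Single pass with a pending-user slot: a user message is held until its
--     assistant reply arrives and the pair is appended together; the trailing
--     unpaired user message (where the prefill belongs) is flushed after the
--     loop, and the system message is placed first when the conversation is
--     created."""
--     conversation = [{"role": "system", "content": system_prompt}] if system_prompt else []
--     pending = None
--     for message in contents:
--         if pending is None:
--             pending = user_template.format(message) if user_template else message
--         else:
--             conversation += [
--                 {"role": "user", "content": pending},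
--                 {"role": "assistant", "content": message},
--             ]
--             pending = None
--     if pending is not None:
--         conversation.append({"role": "user", "content": pending})
--         if assistant_prefill:
--             conversation.append({"role": "assistant", "content": assistant_prefill})
--     return conversation
-- ===== Notes on version B (the rewrite author's own statement) =====
-- stated objective: alternative
-- what changed: Replaces A's enumerate-indexed fold with a per-element parity branch plus a post-hoc conversation[-1] role check by a single pass with a pending-user slot: each user message is held until its assistant reply arrives and the pair is appended together, and the trailing unpaired user message (with the assistant_prefill) is flushed after the loop.
-- outside the precondition, e.g. on make_conversation_from_contents(['x'], None, '{', None): A raises ValueError, B raises ValueError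
import Mathlib
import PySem

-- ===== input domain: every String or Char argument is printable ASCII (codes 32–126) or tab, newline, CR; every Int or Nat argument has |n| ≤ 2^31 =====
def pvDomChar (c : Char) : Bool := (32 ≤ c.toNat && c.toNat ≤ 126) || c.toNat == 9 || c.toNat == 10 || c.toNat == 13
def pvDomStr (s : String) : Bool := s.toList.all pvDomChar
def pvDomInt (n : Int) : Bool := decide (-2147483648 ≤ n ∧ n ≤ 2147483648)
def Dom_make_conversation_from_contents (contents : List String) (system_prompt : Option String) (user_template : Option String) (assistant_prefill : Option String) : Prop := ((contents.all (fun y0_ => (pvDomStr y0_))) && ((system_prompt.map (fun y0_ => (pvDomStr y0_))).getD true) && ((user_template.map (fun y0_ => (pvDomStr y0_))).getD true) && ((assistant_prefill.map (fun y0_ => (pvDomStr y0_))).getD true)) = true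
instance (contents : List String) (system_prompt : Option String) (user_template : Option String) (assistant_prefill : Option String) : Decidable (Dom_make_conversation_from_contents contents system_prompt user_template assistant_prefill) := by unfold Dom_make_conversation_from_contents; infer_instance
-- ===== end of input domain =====

-- B builds the conversation in one pass with a pending-user slot ((user, assistant) pairs appended
-- together, the trailing unpaired user flushed after the loop, prefill attached during that flush)
-- instead of A's enumerate-parity fold with a post-hoc last-role check; same value on Pre_
-- (alternative decomposition, not claimed faster).

-- Python truthiness of an Optional[str]: none and "" are falsy
def pvTruthy (o : Option String) : Bool := !(o.getD "" == "")

-- user_template.format(content) for ONE positional argument; exact exactly when the template's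
-- brace characters occur only as at most one "{}" replacement field (guaranteed by Pre_ below)
def pvFormat1 (t c : String) : String := PySem.Str.replace t "{}" c

-- d["role"] on a literal message dict: first pair whose key matches (key is always present here)
def pvLookup (d : List (String × String)) (k : String) : Option String :=
  (d.find? (fun p => p.1 == k)).map (fun p => p.2)

-- ===== PORT A =====
-- loop body of A's `for i, content in enumerate(contents)`
def pvAStep (ut : Option String) (conversation : List (List (String × String))) (ic : Int × String) : List (List (String × String)) :=
  if PySem.Int.mod ic.1 2 == 0 then
    conversation ++ [[("role", "user"), ("content", if pvTruthy ut then pvFormat1 (ut.getD "") ic.2 else ic.2)]]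
  else
    conversation ++ [[("role", "assistant"), ("content", ic.2)]]

def make_conversation_from_contents (contents : List String) (system_prompt : Option String) (user_template : Option String) (assistant_prefill : Option String) : List (List (String × String)) :=
  let conversation : List (List (String × String)) :=
    if pvTruthy system_prompt then [[("role", "system"), ("content", system_prompt.getD "")]] else []
  let conversation := (PySem.List.enumerate contents).foldl (pvAStep user_template) conversation
  if pvTruthy assistant_prefill then
    match PySem.List.pyGet? conversation (-1) with
    | none => conversation   -- Python raises IndexError here; Pre_ excludes this case
    | some last =>
      if pvLookup last "role" == some "user" then
        conversation ++ [[("role", "assistant"), ("content", assistant_prefill.getD "")]]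
      else conversation
  else conversation

-- ===== PORT B =====
-- Source B's loop body: hold a user message until its assistant reply arrives, then append the pair
def pvBStep (ut : Option String) (s : List (List (String × String)) × Option String) (message : String) : List (List (String × String)) × Option String :=
  match s.2 with
  | none => (s.1, some (if pvTruthy ut then pvFormat1 (ut.getD "") message else message))
  | some pending =>
    (s.1 ++ [[("role", "user"), ("content", pending)], [("role", "assistant"), ("content", message)]], none)

-- Source B's post-loop flush of the trailing unpaired user message (takes the prefill)
def pvFlush (ap : Option String) (s : List (List (String × String)) × Option String) : List (List (String × String)) :=
  match s.2 with
  | none => s.1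
  | some pending =>
    let conversation := s.1 ++ [[("role", "user"), ("content", pending)]]
    if pvTruthy ap then conversation ++ [[("role", "assistant"), ("content", ap.getD "")]] else conversation

def make_conversation_from_contents_alt (contents : List String) (system_prompt : Option String) (user_template : Option String) (assistant_prefill : Option String) : List (List (String × String)) :=
  pvFlush assistant_prefill
    (contents.foldl (pvBStep user_template)
      ((if pvTruthy system_prompt then [[("role", "system"), ("content", system_prompt.getD "")]] else []), none))

-- ===== PRECONDITION & SPEC =====
-- Pre_ excludes (i) inputs where A raises: empty contents with no truthy system prompt and a truthy
-- assistant_prefill (IndexError on conversation[-1]), and (ii) user_templates whose braces do not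
-- form at most one "{}" field (str.format raises ValueError/IndexError/KeyError on most of them);
-- the brace condition also excludes some templates ("{0}", "{{}}") on which format RETURNS --
-- there A and B agree (both call format), but the full format mini-language is outside the
-- port's exact domain (see pvFormat1).
def pvTemplateOK : Option String -> Bool
  | none => true
  | some t => decide (PySem.Str.count t "{}" <= 1)
      && (PySem.Str.count t "{" == PySem.Str.count t "{}")
      && (PySem.Str.count t "}" == PySem.Str.count t "{}")

def Pre_make_conversation_from_contents (contents : List String) (system_prompt : Option String) (user_template : Option String) (assistant_prefill : Option String) : Prop :=
  pvTemplateOK user_template = true ∧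
  ¬ (pvTruthy assistant_prefill = true ∧ contents = [] ∧ pvTruthy system_prompt = false)
instance (contents : List String) (system_prompt : Option String) (user_template : Option String) (assistant_prefill : Option String) : Decidable (Pre_make_conversation_from_contents contents system_prompt user_template assistant_prefill) := by unfold Pre_make_conversation_from_contents; infer_instance

def pvWitness_make_conversation_from_contents : List String × Option String × Option String × Option String :=
  (["hi", "there", "next"], some "be nice", some "Q: {}", some "Sure,")

def Spec_make_conversation_from_contents (contents : List String) (system_prompt : Option String) (user_template : Option String) (assistant_prefill : Option String) (out : List (List (String × String))) : Prop := out = make_conversation_from_contents_alt contents system_prompt user_template assistant_prefill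
instance (contents : List String) (system_prompt : Option String) (user_template : Option String) (assistant_prefill : Option String) (out : List (List (String × String))) : Decidable (Spec_make_conversation_from_contents contents system_prompt user_template assistant_prefill out) := by unfold Spec_make_conversation_from_contents; infer_instance

-- ===== CLAIM (what is proved, stated in full; the proofs are below) =====
def Claim_equal_make_conversation_from_contents : Prop := ∀ (contents : List String) (system_prompt : Option String) (user_template : Option String) (assistant_prefill : Option String), Dom_make_conversation_from_contents contents system_prompt user_template assistant_prefill → Pre_make_conversation_from_contents contents system_prompt user_template assistant_prefill → Spec_make_conversation_from_contents contents system_prompt user_template assistant_prefill (make_conversation_from_contents contents system_prompt user_template assistant_prefill)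

-- ===== LEMMAS AND PROOFS =====

-- formatted user content (both programs compute it; B inside pvBStep, A inline)
def pvFmtB (ut : Option String) (c : String) : String :=
  if pvTruthy ut then pvFormat1 (ut.getD "") c else c

-- A's loop result, message by message, starting at index i
def pvRender (ut : Option String) : Int → List String → List (List (String × String))
  | _, [] => []
  | i, c :: cs =>
    (if PySem.Int.mod i 2 == 0 then [("role", "user"), ("content", pvFmtB ut c)]
     else [("role", "assistant"), ("content", c)]) :: pvRender ut (i + 1) cs

theorem pvRender_cons (ut : Option String) (i : Int) (c : String) (cs : List String) :
    pvRender ut i (c :: cs) =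
      (if PySem.Int.mod i 2 == 0 then [("role", "user"), ("content", pvFmtB ut c)]
       else [("role", "assistant"), ("content", c)]) :: pvRender ut (i + 1) cs := rfl

theorem pvRender_ne_nil (ut : Option String) (i : Int) (c : String) (cs : List String) :
    pvRender ut i (c :: cs) ≠ [] := by simp [pvRender]

theorem pvGetLast_cons {α : Type} (x : α) (l : List α) (h : l ≠ []) :
    (x :: l).getLast? = l.getLast? := List.getLast?_append_of_ne_nil [x] h

theorem foldl_pvAStep (ut : Option String) (cs : List String) :
    ∀ (i : Int) (conv : List (List (String × String))),
      (PySem.List.enumerate cs i).foldl (pvAStep ut) conv = conv ++ pvRender ut i cs := by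
  induction cs with
  | nil => intro i conv; simp [PySem.List.enumerate, pvRender]
  | cons c cs ih =>
    intro i conv
    rw [PySem.List.enumerate_cons]
    simp only [List.foldl_cons]
    rw [ih, pvRender_cons]
    by_cases h : (2 : Int) ∣ i <;> simp [pvAStep, pvFmtB, h]

theorem pvRender_add_two (ut : Option String) (cs : List String) :
    ∀ i : Int, pvRender ut (i + 2) cs = pvRender ut i cs := by
  induction cs with
  | nil => intro i; simp [pvRender]
  | cons c cs ih =>
    intro i
    have hm : PySem.Int.mod (i + 2) 2 = PySem.Int.mod i 2 := by
      rw [PySem.Int.mod_eq_emod_of_pos (by norm_num), PySem.Int.mod_eq_emod_of_pos (by norm_num)]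
      omega
    simp only [pvRender]
    rw [hm, show i + 2 + 1 = i + 1 + 2 by ring, ih]

theorem pvFoldB_eq (ut ap : Option String) :
    ∀ (cs : List String) (conv : List (List (String × String))),
      pvFlush ap (cs.foldl (pvBStep ut) (conv, none)) = conv ++ pvRender ut 0 cs ++
        (if cs.length % 2 == 1 && pvTruthy ap then [[("role", "assistant"), ("content", ap.getD "")]] else [])
  | [], conv => by simp [pvFlush, pvRender]
  | [c], conv => by
    by_cases h : pvTruthy ap <;>
      simp [pvFlush, pvBStep, pvFmtB, pvRender, h, PySem.Int.mod]
  | c1 :: c2 :: rest, conv => by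
    have ih := pvFoldB_eq ut ap rest
      (conv ++ [[("role", "user"), ("content", pvFmtB ut c1)], [("role", "assistant"), ("content", c2)]])
    have hr : pvRender ut 2 rest = pvRender ut 0 rest := by
      simpa using pvRender_add_two ut rest 0
    have hlen : (rest.length + 1 + 1) % 2 = rest.length % 2 := by omega
    simp only [List.foldl_cons, pvBStep, pvFmtB] at ih ⊢
    rw [ih]
    simp [pvRender, hr, hlen, pvFmtB, PySem.Int.mod]

theorem pvRender_getLast (ut : Option String) (cs : List String) :
    ∀ i : Int, cs ≠ [] → ∃ m, (pvRender ut i cs).getLast? = some m ∧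
      pvLookup m "role" = some (if PySem.Int.mod (i + cs.length) 2 == 1 then "user" else "assistant") := by
  induction cs with
  | nil => intro i h; exact absurd rfl h
  | cons c cs ih =>
    intro i _
    cases cs with
    | nil =>
      refine ⟨if PySem.Int.mod i 2 == 0 then [("role", "user"), ("content", pvFmtB ut c)]
              else [("role", "assistant"), ("content", c)], by simp [pvRender], ?_⟩
      by_cases h : i % 2 = 0
      · have h1 : (i + 1) % 2 = 1 := by omega
        simp [pvLookup, h, h1]
      · have h0 : i % 2 = 1 := by omega
        have h1 : (i + 1) % 2 = 0 := by omega
        simp [pvLookup, h0, h1]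
    | cons c2 cs2 =>
      obtain ⟨m, hm, hrole⟩ := ih (i + 1) (by simp)
      have harg : i + 1 + ((c2 :: cs2).length : Int) = i + ((c :: c2 :: cs2).length : Int) := by
        push_cast [List.length_cons]; ring
      rw [harg] at hrole
      refine ⟨m, ?_, hrole⟩
      rw [pvRender, pvGetLast_cons _ _ (pvRender_ne_nil ut (i + 1) c2 cs2)]
      exact hm

theorem pv_ports_eq (contents : List String) (system_prompt : Option String) (user_template : Option String) (assistant_prefill : Option String) :
    make_conversation_from_contents contents system_prompt user_template assistant_prefill =
      make_conversation_from_contents_alt contents system_prompt user_template assistant_prefill := by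
  unfold make_conversation_from_contents make_conversation_from_contents_alt
  simp only [foldl_pvAStep]
  cases contents with
  | nil =>
    by_cases hs : pvTruthy system_prompt <;> by_cases ha : pvTruthy assistant_prefill <;>
      simp [hs, ha, pvRender, pvFlush, PySem.List.pyGet?_neg_one, pvLookup]
  | cons c cs =>
    rw [pvFoldB_eq]
    obtain ⟨m, hm, hrole⟩ := pvRender_getLast user_template (c :: cs) 0 (by simp)
    have hne := pvRender_ne_nil user_template 0 c cs
    have hlast : (((if pvTruthy system_prompt = true then [[("role", "system"), ("content", system_prompt.getD "")]] else []) ++ pvRender user_template 0 (c :: cs))).getLast? = some m :=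
      (List.getLast?_append_of_ne_nil _ hne).trans hm
    rw [PySem.List.pyGet?_neg_one, hlast]
    by_cases ha : pvTruthy assistant_prefill
    · simp only [ha, if_true]
      rw [hrole]
      have hcast : (0 : Int) + ((c :: cs).length : Int) = (((c :: cs).length : Nat) : Int) := by ring
      rw [hcast]
      have hmod : PySem.Int.mod (((c :: cs).length : Nat) : Int) 2 = (((c :: cs).length % 2 : Nat) : Int) := by
        rw [PySem.Int.mod_eq_emod_of_pos (by norm_num)]; omega
      rw [hmod]
      by_cases hodd : (c :: cs).length % 2 = 1
      · have h1 : (cs.length + 1) % 2 = 1 := by simpa using hodd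
        simp [h1]
      · have h1 : (cs.length + 1) % 2 = 0 := by
          have := hodd; simp [List.length_cons] at this ⊢; omega
        simp [h1]
    · simp [ha]

-- ===== VERDICT (by name: the statement is the Claim_ definition above) =====
theorem make_conversation_from_contents_spec : Claim_equal_make_conversation_from_contents := by
  intro contents system_prompt user_template assistant_prefill _ _
  exact pv_ports_eq contents system_prompt user_template assistant_prefill
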